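-- pv_equiv track=rewrite | github.com/DuvenderSandhu/Scrapify | utils.py | create_extraction_plan
-- ===== SOURCE A (Python) =====
-- REGEX_PATTERNS = {
--     'email': r'[a-zA-Z0-9._%+-]+@[a-zA-Z0-9.-]+\.[a-zA-Z]{2,}',
--     'phone': r'(\+\d{1,3}[\s.-]?)?\(?\d{3}\)?[\s.-]?\d{3}[\s.-]?\d{4}',
--     'url': r'https?://(?:[-\w.]|(?:%[\da-fA-F]{2}))+[/\w\.-]*\??[-\w%&=]*',
--     'date': r'\d{1,2}[/\-]\d{1,2}[/\-]\d{2,4}',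
--     'price': r'\$\s*\d+(?:\.\d{2})?',
--     'address': r'\d+\s+[A-Za-z\s,]+\s+(?:Avenue|Lane|Road|Boulevard|Drive|Street|Ave|Dr|Rd|Blvd|Ln|St)\.?(?:\s+[A-Za-z]+)?(?:,\s+[A-Za-z]+)?(?:,\s+[A-Z]{2})?(?:\s+\d{5})?',
--     'name': r'[A-Z][a-z]+ [A-Z][a-z]+',
-- }
--
-- def create_extraction_plan(fields):
--     """Create an extraction plan based on requested fields"""
--     plan = {}
--
--     for field in fields:
--         field_lower = field.lower()
--
--         # Match field to regex pattern
--         if field_lower in REGEX_PATTERNS: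
--             plan[field] = {
--                 'type': 'regex',
--                 'pattern': REGEX_PATTERNS[field_lower]
--             }
--         elif 'email' in field_lower:
--             plan[field] = {
--                 'type': 'regex',
--                 'pattern': REGEX_PATTERNS['email']
--             }
--         elif 'phone' in field_lower or 'tel' in field_lower or 'mobile' in field_lower:
--             plan[field] = {
--                 'type': 'regex',
--                 'pattern': REGEX_PATTERNS['phone']
--             }
--         elif 'date' in field_lower or 'dob' in field_lower or 'birthday' in field_lower:
--             plan[field] = {
--                 'type': 'regex',
--                 'pattern': REGEX_PATTERNS['date']
--             }
--         elif 'price' in field_lower or 'cost' in field_lower or 'amount' in field_lower: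
--             plan[field] = {
--                 'type': 'regex',
--                 'pattern': REGEX_PATTERNS['price']
--             }
--         elif 'address' in field_lower or 'location' in field_lower:
--             plan[field] = {
--                 'type': 'regex',
--                 'pattern': REGEX_PATTERNS['address']
--             }
--         elif 'name' in field_lower:
--             plan[field] = {
--                 'type': 'regex',
--                 'pattern': REGEX_PATTERNS['name']
--             }
--         else:
--             # For unknown fields, create a generic extraction plan
--             plan[field] = {
--                 'type': 'unknown',
--                 'field': field
--             }
--
--     return plan
-- ===== SOURCE B (Python) =====
-- REGEX_PATTERNS = {
--     'email': r'[a-zA-Z0-9._%+-]+@[a-zA-Z0-9.-]+\.[a-zA-Z]{2,}',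
--     'phone': r'(\+\d{1,3}[\s.-]?)?\(?\d{3}\)?[\s.-]?\d{3}[\s.-]?\d{4}',
--     'url': r'https?://(?:[-\w.]|(?:%[\da-fA-F]{2}))+[/\w\.-]*\??[-\w%&=]*',
--     'date': r'\d{1,2}[/\-]\d{1,2}[/\-]\d{2,4}',
--     'price': r'\$\s*\d+(?:\.\d{2})?',
--     'address': r'\d+\s+[A-Za-z\s,]+\s+(?:Avenue|Lane|Road|Boulevard|Drive|Street|Ave|Dr|Rd|Blvd|Ln|St)\.?(?:\s+[A-Za-z]+)?(?:,\s+[A-Za-z]+)?(?:,\s+[A-Z]{2})?(?:\s+\d{5})?',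
--     'name': r'[A-Z][a-z]+ [A-Z][a-z]+',
-- }
--
--
-- def create_extraction_plan(fields):
--     """Create an extraction plan based on requested fields.
--
--     Multi-pass partition refinement: the distinct fields flow through a cascade
--     of classification stages; each stage claims the fields it recognises and
--     passes the rest on.  A final rendering pass over the original list builds
--     the plan from the recorded keys (classification depends only on the field
--     string, so duplicates are consistent and insertion order is preserved).
--     """
--     stages = [
--         (lambda fl: fl in REGEX_PATTERNS, lambda fl: fl),
--         (lambda fl: 'email' in fl, lambda fl: 'email'),
--         (lambda fl: 'phone' in fl or 'tel' in fl or 'mobile' in fl, lambda fl: 'phone'),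
--         (lambda fl: 'date' in fl or 'dob' in fl or 'birthday' in fl, lambda fl: 'date'),
--         (lambda fl: 'price' in fl or 'cost' in fl or 'amount' in fl, lambda fl: 'price'),
--         (lambda fl: 'address' in fl or 'location' in fl, lambda fl: 'address'),
--         (lambda fl: 'name' in fl, lambda fl: 'name'),
--     ]
--     key_of = {}
--     pending = list(dict.fromkeys(fields))
--     for pred, keyfn in stages:
--         rest = []
--         for f in pending:
--             fl = f.lower()
--             if pred(fl):
--                 key_of[f] = keyfn(fl)
--             else:
--                 rest.append(f)
--         pending = rest
--     for f in pending:
--         key_of[f] = None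
--     plan = {}
--     for f in fields:
--         k = key_of[f]
--         if k is not None:
--             plan[f] = {'type': 'regex', 'pattern': REGEX_PATTERNS[k]}
--         else:
--             plan[f] = {'type': 'unknown', 'field': f}
--     return plan
-- ===== Notes on version B (the rewrite author's own statement) =====
-- stated objective: alternative
-- what changed: Replaces A's single pass with a per-field if-elif classification chain by multi-pass partition refinement: the distinct fields flow through a cascade of seven classification stages, each stage claiming the fields it recognises and passing the rest on, followed by one rendering pass over the original list that builds the plan from the recorded keys.
import Mathlib
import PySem

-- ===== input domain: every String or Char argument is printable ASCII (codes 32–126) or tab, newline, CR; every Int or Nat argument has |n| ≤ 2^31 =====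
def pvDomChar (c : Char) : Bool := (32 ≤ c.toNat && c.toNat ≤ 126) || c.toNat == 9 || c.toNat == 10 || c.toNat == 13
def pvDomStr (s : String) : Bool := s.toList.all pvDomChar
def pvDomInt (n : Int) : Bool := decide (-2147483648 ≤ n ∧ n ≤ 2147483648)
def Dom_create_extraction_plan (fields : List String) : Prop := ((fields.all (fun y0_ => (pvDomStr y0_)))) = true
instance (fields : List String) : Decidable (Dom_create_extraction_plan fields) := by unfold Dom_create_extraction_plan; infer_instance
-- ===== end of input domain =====

-- B replaces A's per-field if-elif chain by multi-pass partition refinement over the distinct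
-- fields (a cascade of classification stages, then one rendering pass); same return value.

-- ===== PORT A =====
-- REGEX_PATTERNS (module-level constant, shared by both versions)
def pvPatterns : PySem.Dict String String := PySem.Dict.ofList [
  ("email", "[a-zA-Z0-9._%+-]+@[a-zA-Z0-9.-]+\\.[a-zA-Z]{2,}"),
  ("phone", "(\\+\\d{1,3}[\\s.-]?)?\\(?\\d{3}\\)?[\\s.-]?\\d{3}[\\s.-]?\\d{4}"),
  ("url", "https?://(?:[-\\w.]|(?:%[\\da-fA-F]{2}))+[/\\w\\.-]*\\??[-\\w%&=]*"),
  ("date", "\\d{1,2}[/\\-]\\d{1,2}[/\\-]\\d{2,4}"),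
  ("price", "\\$\\s*\\d+(?:\\.\\d{2})?"),
  ("address", "\\d+\\s+[A-Za-z\\s,]+\\s+(?:Avenue|Lane|Road|Boulevard|Drive|Street|Ave|Dr|Rd|Blvd|Ln|St)\\.?(?:\\s+[A-Za-z]+)?(?:,\\s+[A-Za-z]+)?(?:,\\s+[A-Z]{2})?(?:\\s+\\d{5})?"),
  ("name", "[A-Z][a-z]+ [A-Z][a-z]+")]

def create_extraction_plan (fields : List String) : List (String × List (String × String)) :=
  (fields.foldl (fun plan field =>
    let field_lower := PySem.Str.lower field
    if pvPatterns.contains field_lower then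
      plan.insert field [("type", "regex"), ("pattern", pvPatterns.getD field_lower "")]
    else if PySem.Str.isIn "email" field_lower then
      plan.insert field [("type", "regex"), ("pattern", pvPatterns.getD "email" "")]
    else if PySem.Str.isIn "phone" field_lower || PySem.Str.isIn "tel" field_lower || PySem.Str.isIn "mobile" field_lower then
      plan.insert field [("type", "regex"), ("pattern", pvPatterns.getD "phone" "")]
    else if PySem.Str.isIn "date" field_lower || PySem.Str.isIn "dob" field_lower || PySem.Str.isIn "birthday" field_lower then
      plan.insert field [("type", "regex"), ("pattern", pvPatterns.getD "date" "")]
    else if PySem.Str.isIn "price" field_lower || PySem.Str.isIn "cost" field_lower || PySem.Str.isIn "amount" field_lower then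
      plan.insert field [("type", "regex"), ("pattern", pvPatterns.getD "price" "")]
    else if PySem.Str.isIn "address" field_lower || PySem.Str.isIn "location" field_lower then
      plan.insert field [("type", "regex"), ("pattern", pvPatterns.getD "address" "")]
    else if PySem.Str.isIn "name" field_lower then
      plan.insert field [("type", "regex"), ("pattern", pvPatterns.getD "name" "")]
    else
      plan.insert field [("type", "unknown"), ("field", field)]
  ) PySem.Dict.empty).items

-- ===== PORT B =====
-- stages: ordered cascade of (predicate on the lowercased field, key function)
def pvStages : List ((String → Bool) × (String → String)) := [
  (fun fl => pvPatterns.contains fl, fun fl => fl),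
  (fun fl => PySem.Str.isIn "email" fl, fun _ => "email"),
  (fun fl => PySem.Str.isIn "phone" fl || PySem.Str.isIn "tel" fl || PySem.Str.isIn "mobile" fl, fun _ => "phone"),
  (fun fl => PySem.Str.isIn "date" fl || PySem.Str.isIn "dob" fl || PySem.Str.isIn "birthday" fl, fun _ => "date"),
  (fun fl => PySem.Str.isIn "price" fl || PySem.Str.isIn "cost" fl || PySem.Str.isIn "amount" fl, fun _ => "price"),
  (fun fl => PySem.Str.isIn "address" fl || PySem.Str.isIn "location" fl, fun _ => "address"),
  (fun fl => PySem.Str.isIn "name" fl, fun _ => "name")]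

-- one stage: claim the fields the predicate recognises, pass the rest on
def pvStageStep (st : PySem.Dict String (Option String) × List String)
    (stage : (String → Bool) × (String → String)) :
    PySem.Dict String (Option String) × List String :=
  st.2.foldl (fun st' f =>
    let fl := PySem.Str.lower f
    if stage.1 fl then (st'.1.insert f (some (stage.2 fl)), st'.2)
    else (st'.1, st'.2 ++ [f])) (st.1, [])

def create_extraction_plan_alt (fields : List String) : List (String × List (String × String)) :=
  let st := pvStages.foldl pvStageStep (PySem.Dict.empty, PySem.List.dedup fields)
  let key_of := st.2.foldl (fun d f => d.insert f none) st.1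
  (fields.foldl (fun plan f =>
    -- k = key_of[f]; the lookup always succeeds: every distinct field was assigned a key
    let k := (key_of.get? f).getD none
    match k with
    | some key => plan.insert f [("type", "regex"), ("pattern", pvPatterns.getD key "")]
    | none => plan.insert f [("type", "unknown"), ("field", f)]
  ) PySem.Dict.empty).items

-- ===== PRECONDITION & SPEC =====
def Spec_create_extraction_plan (fields : List String) (out : List (String × List (String × String))) : Prop := out = create_extraction_plan_alt fields
instance (fields : List String) (out : List (String × List (String × String))) : Decidable (Spec_create_extraction_plan fields out) := by unfold Spec_create_extraction_plan; infer_instance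

-- ===== CLAIM =====
def Claim_equal_create_extraction_plan : Prop := ∀ (fields : List String), Dom_create_extraction_plan fields → Spec_create_extraction_plan fields (create_extraction_plan fields)

-- ===== LEMMAS AND PROOFS =====

-- the key A's chain would select for a field (proof-side characterisation)
def pvClassify (f : String) : Option String :=
  match pvStages.find? (fun s => s.1 (PySem.Str.lower f)) with
  | some s => some (s.2 (PySem.Str.lower f))
  | none => none

-- the plan entry for a field given its key
def pvRender (f : String) : Option String → List (String × String)
  | some k => [("type", "regex"), ("pattern", pvPatterns.getD k "")]
  | none => [("type", "unknown"), ("field", f)]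

theorem pvA_step_eq (plan : PySem.Dict String (List (String × String))) (f : String) :
    (let field_lower := PySem.Str.lower f
     if pvPatterns.contains field_lower then
       plan.insert f [("type", "regex"), ("pattern", pvPatterns.getD field_lower "")]
     else if PySem.Str.isIn "email" field_lower then
       plan.insert f [("type", "regex"), ("pattern", pvPatterns.getD "email" "")]
     else if PySem.Str.isIn "phone" field_lower || PySem.Str.isIn "tel" field_lower || PySem.Str.isIn "mobile" field_lower then
       plan.insert f [("type", "regex"), ("pattern", pvPatterns.getD "phone" "")]
     else if PySem.Str.isIn "date" field_lower || PySem.Str.isIn "dob" field_lower || PySem.Str.isIn "birthday" field_lower then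
       plan.insert f [("type", "regex"), ("pattern", pvPatterns.getD "date" "")]
     else if PySem.Str.isIn "price" field_lower || PySem.Str.isIn "cost" field_lower || PySem.Str.isIn "amount" field_lower then
       plan.insert f [("type", "regex"), ("pattern", pvPatterns.getD "price" "")]
     else if PySem.Str.isIn "address" field_lower || PySem.Str.isIn "location" field_lower then
       plan.insert f [("type", "regex"), ("pattern", pvPatterns.getD "address" "")]
     else if PySem.Str.isIn "name" field_lower then
       plan.insert f [("type", "regex"), ("pattern", pvPatterns.getD "name" "")]
     else
       plan.insert f [("type", "unknown"), ("field", f)])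
    = plan.insert f (pvRender f (pvClassify f)) := by
  simp only [pvClassify, pvStages, List.find?]
  split_ifs <;> simp_all only [Bool.not_eq_true, pvRender]

-- one stage, unrolled: the dict picks up exactly the claimed fields, the rest flow on in order
theorem pvStage_fold (p : String → Bool) (kf : String → String)
    (pending : List String) (d : PySem.Dict String (Option String)) (r : List String) :
    pending.foldl (fun st' f =>
      let fl := PySem.Str.lower f
      if p fl then (st'.1.insert f (some (kf fl)), st'.2)
      else (st'.1, st'.2 ++ [f])) (d, r)
    = (pending.foldl (fun d' f =>
        if p (PySem.Str.lower f) then d'.insert f (some (kf (PySem.Str.lower f))) else d') d,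
       r ++ pending.filter (fun f => !p (PySem.Str.lower f))) := by
  induction pending generalizing d r with
  | nil => simp
  | cons a t ih =>
    simp only [List.foldl_cons, List.filter_cons]
    by_cases h : p (PySem.Str.lower a) <;> simp [h, ih]

theorem pvStage_dict_get? (p : String → Bool) (kf : String → String)
    (pending : List String) (d : PySem.Dict String (Option String)) (x : String) :
    (pending.foldl (fun d' f =>
      if p (PySem.Str.lower f) then d'.insert f (some (kf (PySem.Str.lower f))) else d') d).get? x
    = if x ∈ pending ∧ p (PySem.Str.lower x) then some (some (kf (PySem.Str.lower x))) else d.get? x := by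
  induction pending generalizing d with
  | nil => simp
  | cons a t ih =>
    simp only [List.foldl_cons, List.mem_cons]
    by_cases hp : p (PySem.Str.lower a)
    · simp only [hp, if_true]
      rw [ih, PySem.Dict.get?_insert]
      by_cases hxa : x = a
      · subst hxa
        simp only [hp, true_or, and_true, ite_true]
        split_ifs <;> rfl
      · simp [hxa]
    · simp only [hp, Bool.false_eq_true, ite_false]
      rw [ih]
      by_cases hxa : x = a
      · subst hxa; simp [hp]
      · simp [hxa]

-- the whole cascade: the final dict records, for each field still pending at the start,
-- the key of the first stage that recognises it; unclaimed fields flow through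
theorem pvCascade_get? (ss : List ((String → Bool) × (String → String)))
    (d : PySem.Dict String (Option String)) (pending : List String) (x : String) :
    ((ss.foldl pvStageStep (d, pending)).1).get? x
    = if x ∈ pending then
        (match ss.find? (fun s => s.1 (PySem.Str.lower x)) with
         | some s => some (some (s.2 (PySem.Str.lower x)))
         | none => d.get? x)
      else d.get? x := by
  induction ss generalizing d pending with
  | nil => simp
  | cons s t ih =>
    simp only [List.foldl_cons]
    rw [show pvStageStep (d, pending) s
        = (pending.foldl (fun d' f =>
            if s.1 (PySem.Str.lower f) then d'.insert f (some (s.2 (PySem.Str.lower f))) else d') d,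
           pending.filter (fun f => !s.1 (PySem.Str.lower f))) from by
      simpa using pvStage_fold s.1 s.2 pending d []]
    rw [ih]
    simp only [List.mem_filter, List.find?, pvStage_dict_get?]
    by_cases hx : x ∈ pending
    · by_cases hp : s.1 (PySem.Str.lower x)
      · simp [hx, hp]
      · rcases hf : t.find? (fun u => u.1 (PySem.Str.lower x)) with _ | u <;>
          simp [hx, hp, hf]
    · rcases t.find? (fun u => u.1 (PySem.Str.lower x)) with _ | u <;>
        simp [hx]

-- the leftover pass: pending fields are recorded as unknown
theorem pvNoneFold_get? (l : List String) (d : PySem.Dict String (Option String)) (x : String) :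
    (l.foldl (fun d' f => d'.insert f none) d).get? x
    = if x ∈ l then some none else d.get? x := by
  induction l generalizing d with
  | nil => simp
  | cons a t ih =>
    simp only [List.foldl_cons, List.mem_cons]
    rw [ih, PySem.Dict.get?_insert]
    by_cases hx : x ∈ t
    · simp [hx]
    · by_cases hxa : x = a <;> simp [hx, hxa]

-- after the cascade and the leftover pass, every requested field is keyed by pvClassify
theorem pvKeyOf_get? (fields : List String) (x : String) (hx : x ∈ fields) :
    (((pvStages.foldl pvStageStep (PySem.Dict.empty, PySem.List.dedup fields)).2).foldl
        (fun d f => d.insert f none)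
        ((pvStages.foldl pvStageStep (PySem.Dict.empty, PySem.List.dedup fields)).1)).get? x
      = some (pvClassify x) := by
  have hmem : x ∈ PySem.List.dedup fields := by
    simpa [PySem.List.mem_dedup] using hx
  -- the pending list after the cascade is the all-stages-rejected filter
  have hsnd : (pvStages.foldl pvStageStep (PySem.Dict.empty, PySem.List.dedup fields)).2
      = (PySem.List.dedup fields).filter
          (fun f => pvStages.all (fun s => !s.1 (PySem.Str.lower f))) := by
    generalize PySem.List.dedup fields = l
    generalize hd : (PySem.Dict.empty : PySem.Dict String (Option String)) = d
    clear hd hmem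
    induction pvStages generalizing d l with
    | nil => simp
    | cons s t ih =>
      simp only [List.foldl_cons]
      rw [show pvStageStep (d, l) s
          = (l.foldl (fun d' f =>
              if s.1 (PySem.Str.lower f) then d'.insert f (some (s.2 (PySem.Str.lower f))) else d') d,
             l.filter (fun f => !s.1 (PySem.Str.lower f))) from by
        simpa using pvStage_fold s.1 s.2 l d []]
      rw [ih, List.filter_filter]
      simp [Bool.and_comm]
  rw [pvNoneFold_get?, hsnd, pvCascade_get?]
  unfold pvClassify
  have hmem' : x ∈ PySem.Set.ofList fields := by
    simpa [PySem.List.dedup_eq_ofList] using hmem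
  rcases hfind : pvStages.find? (fun s => s.1 (PySem.Str.lower x)) with _ | s
  · -- no stage matches: x survives to the leftover pass
    have hall : ∀ s ∈ pvStages, s.1 (PySem.Str.lower x) = false := by
      intro s hs
      simpa using List.find?_eq_none.mp hfind s hs
    have hin : x ∈ (PySem.Set.ofList fields).filter
        (fun f => pvStages.all (fun s => !s.1 (PySem.Str.lower f))) := by
      simp only [List.mem_filter, List.all_eq_true]
      exact ⟨hmem', fun s hs => by simp [hall s hs]⟩
    simp [hin, hfind]
  · -- stage s claims x: x is not in the leftover list
    have hsmem : s ∈ pvStages := List.mem_of_find?_eq_some hfind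
    have hsp : s.1 (PySem.Str.lower x) = true := by
      simpa using List.find?_some hfind
    have hnot : ¬ (x ∈ (PySem.Set.ofList fields).filter
        (fun f => pvStages.all (fun s => !s.1 (PySem.Str.lower f)))) := by
      simp only [List.mem_filter, List.all_eq_true]
      rintro ⟨-, hall⟩
      have := hall s hsmem
      simp [hsp] at this
    simp [hnot, hx, hfind]

-- ===== VERDICT =====
theorem create_extraction_plan_spec : Claim_equal_create_extraction_plan := by
  intro fields _
  unfold Spec_create_extraction_plan create_extraction_plan create_extraction_plan_alt
  congr 1
  apply PySem.List.foldl_congr_mem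
  intro plan f hf
  rw [pvA_step_eq, pvKeyOf_get? fields f hf]
  cases pvClassify f <;> simp [pvRender]
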